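-- pv_equiv track=rewrite | github.com/KinJianXin/MyProjects | Algorithm and Data Structures/dynamicProgramming.py | best_schedule
-- ===== SOURCE A (Python) =====
-- def best_schedule(weekly_income: list, competitions: list) -> int:
--     """
--     Function to return an integer, which is the maximum amount of money that can be earned by an athlete
--     :param weekly_income: list a stores the amount of money the athlete will
--                           earn working as a personal trainer in a specific week
--     :param competitions: list of tuples that contain start time, end time and winnings of a competition
--     :return: integer that represents the maximum amount of money that can be earned by an athlete
--     :time complexity: O(nlogn) where n is the total number of elements in weekly_income and competitions put together.
--     :space complexity: O(n) where n is the total number of elements in weekly_income and competitions put together.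
--     """
--     weekly_income = weekly_income_preprocess(weekly_income)
--     option_list = merge_sort(weekly_income + competitions)
--     memo = [0] * (len(weekly_income) + 1)
--     for index in range(0, len(option_list)):
--         start = option_list[index][0]
--         end = option_list[index][1]
--         profit = option_list[index][2]
--         memo[end + 1] = max(memo[end + 1], memo[start] + profit)
--     return memo[-1]
--
-- def weekly_income_preprocess(input_list: list) -> list:
--     """
--     Function that preprocess input_list into a more appropriate form
--     :param input_list: list to be preprocessed
--     :return: preprocessed input_list
--     :time complexity: O(n) where: n is the number of elements in input_list
--     :space complexity: O(n) where: n is the number of elements in input_list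
--     """
--     output = []
--     for i in range(0, len(input_list)):
--         output.append((i, i, input_list[i]))
--     return output
--
-- def merge_sort(input_list: list) -> list:
--     """
--     Sort function that sorts input_list using recursion
--     :param input_list: list to be sorted
--     :return: sorted input_list
--     :time complexity: O(nlogn) where: n is the number of elements in input_list
--     :space complexity: O(n) where: n is the number of elements in input_list
--     """
--     n = len(input_list)
--     if n <= 1:
--         return input_list
--     else:
--         left = merge_sort(input_list[:n // 2])
--         right = merge_sort(input_list[n // 2:])
--     return merge(left, right)
--
-- def merge(list1: list, list2: list) -> list:
--     """
--     Function that merges two list in ascending order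
--     :param list1: first list to be merged
--     :param list2: second list to be merged
--     :return: merged list in ascending order
--     :time complexity: O(n) where: n is the number of elements in list1 + list2
--     :space complexity: O(n) where: n is the number of elements in list1 + list2
--     """
--     output = []
--     i, j = 0, 0
--     while i < len(list1) and j < len(list2):
--         if list1[i][1] <= list2[j][1]:
--             output += [list1[i]]
--             i += 1
--         else:
--             output += [list2[j]]
--             j += 1
--     return output + list1[i:] + list2[j:]
-- ===== SOURCE B (Python) =====
-- def best_schedule(weekly_income, competitions):
--     n = len(weekly_income)
--     best = [0] * (n + 1)
--     for j in range(n):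
--         best[j + 1] = max(best[j + 1], best[j] + weekly_income[j])
--         for s, e, p in competitions:
--             if e == j:
--                 best[j + 1] = max(best[j + 1], best[s] + p)
--     return best[n]
-- ===== Notes on version B (the rewrite author's own statement) =====
-- stated objective: simpler
-- what changed: Replaces A's preprocessing into weekly tuples plus a hand-written recursive merge sort by end time followed by one relaxation pass with a direct forward DP over week positions on a preallocated array: for each week j it applies the weekly update and rescans the competition list for intervals ending at j, so no sorting or tuple merging happens at all.
-- intended difference: On inputs with a competition ending at week -1 or -2 with positive winnings, A silently counts a competition ending before the working period starts (its write memo[end+1] lands on memo[0], resp. on the final cell via Python's -1 wraparound; e.g. A returns 8 on ([5],[(0,-1,3)])), while B ignores competitions that do not end in a real week and returns 5, the intended maximum over schedulable tasks. — e.g. on best_schedule([5], [(0, -1, 3)]): A returns 8, B returns 5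
-- outside the precondition, e.g. on best_schedule([5], [(0, -3, 9)]): A returns 14, B returns 5
import Mathlib
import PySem

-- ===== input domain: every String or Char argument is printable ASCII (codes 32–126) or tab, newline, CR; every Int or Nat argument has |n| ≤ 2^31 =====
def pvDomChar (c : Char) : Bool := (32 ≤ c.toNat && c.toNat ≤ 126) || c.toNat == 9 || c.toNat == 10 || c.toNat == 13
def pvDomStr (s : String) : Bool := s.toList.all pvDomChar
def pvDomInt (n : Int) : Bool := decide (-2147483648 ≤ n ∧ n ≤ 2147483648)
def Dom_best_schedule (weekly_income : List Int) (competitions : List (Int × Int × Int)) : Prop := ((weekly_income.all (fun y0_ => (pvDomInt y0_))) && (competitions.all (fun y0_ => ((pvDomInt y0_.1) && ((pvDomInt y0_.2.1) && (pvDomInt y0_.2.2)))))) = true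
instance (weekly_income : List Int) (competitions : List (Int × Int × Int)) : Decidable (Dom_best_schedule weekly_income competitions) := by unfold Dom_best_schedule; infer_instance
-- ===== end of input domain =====

-- B replaces A's preprocess + merge-sort + relaxation pass by a forward DP over week
-- positions that rescans the competition list per week, with no sorting (objective: simpler).

-- Python list assignment `xs[i] = v` (negative index wraps; where Python would raise
-- IndexError — excluded by Pre_ — the port leaves the list unchanged).
def pySetIdx (xs : List Int) (i : Int) (v : Int) : List Int :=
  let j : Int := if i < 0 then i + xs.length else i
  if 0 ≤ j ∧ j < (xs.length : Int) then xs.set j.toNat v else xs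

-- ===== PORT A =====
-- merge(list1, list2): the while loop over indices i, j plus the appended remainders,
-- as the standard structural recursion over the two lists.
def mergeA (list1 list2 : List (Int × Int × Int)) : List (Int × Int × Int) :=
  match list1, list2 with
  | [], l2 => l2
  | l1, [] => l1
  | a :: t1, b :: t2 =>
    if a.2.1 ≤ b.2.1 then a :: mergeA t1 (b :: t2) else b :: mergeA (a :: t1) t2

-- merge_sort(input_list)
def merge_sortA (input_list : List (Int × Int × Int)) : List (Int × Int × Int) :=
  if input_list.length ≤ 1 then input_list
  else
    mergeA (merge_sortA (input_list.take (input_list.length / 2)))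
           (merge_sortA (input_list.drop (input_list.length / 2)))
termination_by input_list.length
decreasing_by
  · simp only [List.length_take]; omega
  · simp only [List.length_drop]; omega

-- weekly_income_preprocess(input_list)
def weekly_income_preprocessA (input_list : List Int) : List (Int × Int × Int) :=
  (PySem.List.pyRange 0 (PySem.List.len input_list) 1).foldl
    (fun output i => output ++ [(i, i, PySem.List.pyGetD input_list i 0)]) []

def best_schedule (weekly_income : List Int) (competitions : List (Int × Int × Int)) : Int :=
  let weekly := weekly_income_preprocessA weekly_income
  let option_list := merge_sortA (weekly ++ competitions)
  let memo : List Int := PySem.List.pyRepeat [(0 : Int)] ((weekly.length : Int) + 1)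
  let memo := (PySem.List.pyRange 0 (PySem.List.len option_list) 1).foldl
    (fun memo index =>
      let t := PySem.List.pyGetD option_list index (0, 0, 0)
      pySetIdx memo (t.2.1 + 1)
        (max (PySem.List.pyGetD memo (t.2.1 + 1) 0) (PySem.List.pyGetD memo t.1 0 + t.2.2)))
    memo
  PySem.List.pyGetD memo (-1) 0

-- ===== PORT B =====
-- Forward DP over week positions on a preallocated array: for each week j,
-- best[j+1] = max(best[j+1], best[j] + income[j]) and, scanning the competition list,
-- best[j+1] = max(best[j+1], best[s] + p) for every (s, e, p) with e == j.
-- Raw reads best[...] / weekly_income[j] are ported as pyGetD (in range under Pre_, so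
-- the default is never taken there); the assignments best[j+1] = ... are the shared
-- pySetIdx helper, as in A.
def best_schedule_alt (weekly_income : List Int) (competitions : List (Int × Int × Int)) : Int :=
  let best : List Int := PySem.List.pyRepeat [(0 : Int)] ((weekly_income.length : Int) + 1)
  let best := (PySem.List.pyRange 0 (PySem.List.len weekly_income) 1).foldl
    (fun best j =>
      let best := pySetIdx best (j + 1)
        (max (PySem.List.pyGetD best (j + 1) 0)
          (PySem.List.pyGetD best j 0 + PySem.List.pyGetD weekly_income j 0))
      competitions.foldl
        (fun best t =>
          if t.2.1 == j then
            pySetIdx best (j + 1)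
              (max (PySem.List.pyGetD best (j + 1) 0)
                (PySem.List.pyGetD best t.1 0 + t.2.2))
          else best) best) best
  PySem.List.pyGetD best (PySem.List.len weekly_income) 0

-- ===== PRECONDITION & SPEC =====
-- Pre_ excludes the inputs on which Python A raises IndexError (a competition start or
-- end+1 that is not a valid, possibly negative, Python index into the memo list of length
-- len(weekly_income)+1) and, in addition, competitions with end ≤ -3 and positive
-- winnings, on which A returns a value only through Python's accidental negative-index
-- wraparound of the write memo[end+1] into the middle of the memo list — a corner no
-- caller would specify, where B simply ignores the unschedulable competition.
def Pre_best_schedule (weekly_income : List Int) (competitions : List (Int × Int × Int)) : Prop :=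
  ∀ c ∈ competitions,
    (-((weekly_income.length : Int) + 1) ≤ c.1 ∧ c.1 ≤ (weekly_income.length : Int)) ∧
    (-((weekly_income.length : Int) + 2) ≤ c.2.1 ∧ c.2.1 ≤ (weekly_income.length : Int) - 1) ∧
    (c.2.1 ≤ -3 → c.2.2 ≤ 0)
instance (weekly_income : List Int) (competitions : List (Int × Int × Int)) : Decidable (Pre_best_schedule weekly_income competitions) := by unfold Pre_best_schedule; infer_instance

def pvWitness_best_schedule : List Int × (List (Int × Int × Int)) := ([4, 5, 3], [(0, 1, 7), (1, 2, 2)])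

-- On inputs with a competition ending at week -1 or -2 with positive winnings, A
-- silently counts a competition that ends before the working period even starts (its
-- write memo[end+1] lands on memo[0], resp. on the final memo cell via Python's -1
-- wraparound), while B ignores competitions that do not end in a real week 0..n-1 and
-- returns the intended maximum earnings over the schedulable tasks.
def D_best_schedule (weekly_income : List Int) (competitions : List (Int × Int × Int)) : Prop :=
  ∃ c ∈ competitions, -2 ≤ c.2.1 ∧ c.2.1 < 0 ∧ 0 < c.2.2
instance (weekly_income : List Int) (competitions : List (Int × Int × Int)) : Decidable (D_best_schedule weekly_income competitions) := by unfold D_best_schedule; infer_instance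

def Spec_best_schedule (weekly_income : List Int) (competitions : List (Int × Int × Int)) (out : Int) : Prop := ¬ D_best_schedule weekly_income competitions → out = best_schedule_alt weekly_income competitions
instance (weekly_income : List Int) (competitions : List (Int × Int × Int)) (out : Int) : Decidable (Spec_best_schedule weekly_income competitions out) := by unfold Spec_best_schedule; infer_instance

def pvDiffWitness_best_schedule : List Int × (List (Int × Int × Int)) := ([5], [(0, -1, 3)])
def pvDiffWitnessOut_best_schedule : Int × Int := (8, 5)

-- ===== CLAIM (what is proved, stated in full; the proofs are below) =====
def Claim_unchanged_best_schedule : Prop := ∀ (weekly_income : List Int) (competitions : List (Int × Int × Int)), Dom_best_schedule weekly_income competitions → Pre_best_schedule weekly_income competitions → Spec_best_schedule weekly_income competitions (best_schedule weekly_income competitions)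
def Claim_changed_best_schedule : Prop := Dom_best_schedule (pvDiffWitness_best_schedule.1) (pvDiffWitness_best_schedule.2) ∧ Pre_best_schedule (pvDiffWitness_best_schedule.1) (pvDiffWitness_best_schedule.2) ∧ D_best_schedule (pvDiffWitness_best_schedule.1) (pvDiffWitness_best_schedule.2) ∧ best_schedule (pvDiffWitness_best_schedule.1) (pvDiffWitness_best_schedule.2) = pvDiffWitnessOut_best_schedule.1 ∧ best_schedule_alt (pvDiffWitness_best_schedule.1) (pvDiffWitness_best_schedule.2) = pvDiffWitnessOut_best_schedule.2 ∧ pvDiffWitnessOut_best_schedule.1 ≠ pvDiffWitnessOut_best_schedule.2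

-- ===== LEMMAS AND PROOFS =====

-- the combined hypothesis the equivalence proof works under: Pre_ together with ¬ D_
def pvGood (weekly_income : List Int) (competitions : List (Int × Int × Int)) : Prop :=
  ∀ c ∈ competitions,
    (-((weekly_income.length : Int) + 1) ≤ c.1 ∧ c.1 ≤ (weekly_income.length : Int)) ∧
    ((0 ≤ c.2.1 ∧ c.2.1 < (weekly_income.length : Int)) ∨
      (-((weekly_income.length : Int) + 2) ≤ c.2.1 ∧ c.2.1 < 0 ∧ c.2.2 ≤ 0))

-- Notation for the proofs: T = triple, key = end time, step = one memo update.
def pvStep (memo : List Int) (t : Int × Int × Int) : List Int :=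
  pySetIdx memo (t.2.1 + 1)
    (max (PySem.List.pyGetD memo (t.2.1 + 1) 0) (PySem.List.pyGetD memo t.1 0 + t.2.2))

def pvW (weekly_income : List Int) : List (Int × Int × Int) :=
  (PySem.List.enumerate weekly_income 0).map (fun p => (p.1, p.1, p.2))

def pvItems (weekly_income : List Int) (competitions : List (Int × Int × Int)) :
    List (Int × Int × Int) := pvW weekly_income ++ competitions

def pvR (a b : Int × Int × Int) : Prop := a.2.1 ≤ b.2.1

lemma mergeA_nil_right (l : List (Int × Int × Int)) : mergeA l [] = l := by
  cases l <;> simp [mergeA]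

lemma mem_mergeA (l1 l2 : List (Int × Int × Int)) (x : Int × Int × Int) :
    x ∈ mergeA l1 l2 ↔ x ∈ l1 ∨ x ∈ l2 := by
  induction l1, l2 using mergeA.induct with
  | case1 l2 => simp [mergeA]
  | case2 l1 _ => simp [mergeA]
  | case3 a t1 b t2 h ih => simp [mergeA, h, ih]; tauto
  | case4 a t1 b t2 h ih => simp [mergeA, h, ih]; tauto

lemma mergeA_pairwise (l1 l2 : List (Int × Int × Int))
    (h1 : l1.Pairwise pvR) (h2 : l2.Pairwise pvR) : (mergeA l1 l2).Pairwise pvR := by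
  induction l1, l2 using mergeA.induct with
  | case1 l2 => simpa [mergeA]
  | case2 l1 h =>
    cases l1 with
    | nil => exact absurd rfl h
    | cons x t => rw [mergeA_nil_right]; exact h1
  | case3 a t1 b t2 h ih =>
    rw [List.pairwise_cons] at h1
    simp only [mergeA, h, if_pos]
    rw [List.pairwise_cons]
    refine ⟨?_, ih h1.2 h2⟩
    intro x hx
    rcases (mem_mergeA _ _ _).1 hx with hx | hx
    · exact h1.1 x hx
    · rcases List.mem_cons.1 hx with rfl | hx
      · exact h
      · rw [List.pairwise_cons] at h2
        exact le_trans h (h2.1 x hx)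
  | case4 a t1 b t2 h ih =>
    rw [List.pairwise_cons] at h2
    simp only [mergeA, h, if_false]
    rw [List.pairwise_cons]
    rw [not_le] at h
    refine ⟨?_, ih h1 h2.2⟩
    intro x hx
    rcases (mem_mergeA _ _ _).1 hx with hx | hx
    · rcases List.mem_cons.1 hx with rfl | hx
      · exact le_of_lt h
      · rw [List.pairwise_cons] at h1
        exact le_trans (le_of_lt h) (h1.1 x hx)
    · exact h2.1 x hx

lemma mergeA_filter (l1 l2 : List (Int × Int × Int)) (k : Int)
    (h1 : l1.Pairwise pvR) (h2 : l2.Pairwise pvR) :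
    (mergeA l1 l2).filter (fun t => t.2.1 == k) =
      l1.filter (fun t => t.2.1 == k) ++ l2.filter (fun t => t.2.1 == k) := by
  induction l1, l2 using mergeA.induct with
  | case1 l2 => simp [mergeA]
  | case2 l1 h => rw [mergeA_nil_right]; simp
  | case3 a t1 b t2 h ih =>
    rw [List.pairwise_cons] at h1
    simp only [mergeA, h, if_pos, List.filter_cons]
    by_cases hk : a.2.1 = k <;> simp [hk, ih h1.2 h2, List.filter_cons]
  | case4 a t1 b t2 h ih =>
    rw [List.pairwise_cons] at h2
    simp only [mergeA, h, if_false, List.filter_cons]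
    rw [not_le] at h
    have hnil : ∀ hk : b.2.1 = k, (a :: t1).filter (fun t => t.2.1 == k) = [] := by
      intro hk
      rw [List.filter_eq_nil_iff]
      intro x hx
      have hxk : k < x.2.1 := by
        rcases List.mem_cons.1 hx with rfl | hx
        · omega
        · rw [List.pairwise_cons] at h1
          have := h1.1 x hx
          unfold pvR at this
          omega
      simp; omega
    by_cases hk : b.2.1 = k
    · have hmt := hnil hk
      simp only [List.filter_cons, beq_iff_eq] at hmt
      simp only [hk, ih h1 h2.2, List.filter_cons, beq_iff_eq, if_pos]
      rw [hmt]
      simp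
    · simp [hk, ih h1 h2.2, List.filter_cons]

lemma merge_sortA_pairwise (l : List (Int × Int × Int)) : (merge_sortA l).Pairwise pvR := by
  induction l using merge_sortA.induct with
  | case1 l h =>
    rw [merge_sortA, if_pos h]
    match l, h with
    | [], _ => exact List.Pairwise.nil
    | [a], _ => simp
  | case2 l h ih1 ih2 =>
    rw [merge_sortA, if_neg h]
    exact mergeA_pairwise _ _ ih1 ih2

lemma merge_sortA_filter (l : List (Int × Int × Int)) (k : Int) :
    (merge_sortA l).filter (fun t => t.2.1 == k) = l.filter (fun t => t.2.1 == k) := by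
  induction l using merge_sortA.induct with
  | case1 l h => rw [merge_sortA, if_pos h]
  | case2 l h ih1 ih2 =>
    rw [merge_sortA, if_neg h,
      mergeA_filter _ _ _ (merge_sortA_pairwise _) (merge_sortA_pairwise _), ih1, ih2,
      ← List.filter_append, List.take_append_drop]

-- uniqueness of a key-sorted, per-key-stable arrangement
lemma pv_uniq (l1 l2 : List (Int × Int × Int))
    (h1 : l1.Pairwise pvR) (h2 : l2.Pairwise pvR)
    (hf : ∀ k, l1.filter (fun t => t.2.1 == k) = l2.filter (fun t => t.2.1 == k)) :
    l1 = l2 := by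
  induction l1 generalizing l2 with
  | nil =>
    cases l2 with
    | nil => rfl
    | cons b t2 =>
      have h0 := hf b.2.1
      simp at h0
  | cons a t1 ih =>
    cases l2 with
    | nil =>
      have h0 := hf a.2.1
      simp at h0
    | cons b t2 =>
      have hab : b.2.1 = a.2.1 := by
        have ha2 : a ∈ (b :: t2).filter (fun t => t.2.1 == a.2.1) := by
          rw [← hf a.2.1]; simp [List.mem_filter]
        have hb1 : b ∈ (a :: t1).filter (fun t => t.2.1 == b.2.1) := by
          rw [hf b.2.1]; simp [List.mem_filter]
        have hle1 : b.2.1 ≤ a.2.1 := by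
          rcases List.mem_cons.1 (List.mem_filter.1 ha2).1 with h | hm
          · rw [h]
          · exact (List.pairwise_cons.1 h2).1 _ hm
        have hle2 : a.2.1 ≤ b.2.1 := by
          rcases List.mem_cons.1 (List.mem_filter.1 hb1).1 with h | hm
          · rw [h]
          · exact (List.pairwise_cons.1 h1).1 _ hm
        omega
      have h0 := hf a.2.1
      simp only [List.filter_cons, beq_iff_eq] at h0
      rw [if_true, if_pos hab] at h0
      obtain ⟨hhd, htl⟩ := List.cons_eq_cons.1 h0
      have hrest : t1 = t2 := by
        apply ih t2 (List.pairwise_cons.1 h1).2 (List.pairwise_cons.1 h2).2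
        intro k
        by_cases hk : k = a.2.1
        · subst hk; exact htl
        · have hkk := hf k
          simp only [List.filter_cons, beq_iff_eq] at hkk
          rw [if_neg (fun hc : a.2.1 = k => hk hc.symm), if_neg (fun hc : b.2.1 = k => hk (hab.symm.trans hc).symm)] at hkk
          exact hkk
      rw [hhd, hrest]

def pvF (items : List (Int × Int × Int)) (e : Int) : List (Int × Int × Int) :=
  items.filter (fun t => t.2.1 == e)

lemma pv_flat_pairwise (items : List (Int × Int × Int)) (K : List Int)
    (hK : K.Pairwise (· < ·)) : (K.flatMap (pvF items)).Pairwise pvR := by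
  induction K with
  | nil => simp
  | cons e K' ih =>
    rw [List.flatMap_cons]
    apply List.pairwise_append.2
    refine ⟨?_, ih (List.pairwise_cons.1 hK).2, ?_⟩
    · apply List.pairwise_of_forall_mem_list
      intro x hx y hy
      have hxk : x.2.1 = e := by simpa using (List.mem_filter.1 hx).2
      have hyk : y.2.1 = e := by simpa using (List.mem_filter.1 hy).2
      unfold pvR; omega
    · intro x hx y hy
      have hxk : x.2.1 = e := by simpa using (List.mem_filter.1 hx).2
      rcases List.mem_flatMap.1 hy with ⟨e', he', hy'⟩
      have hyk : y.2.1 = e' := by simpa using (List.mem_filter.1 hy').2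
      have hlt : e < e' := (List.pairwise_cons.1 hK).1 _ he'
      unfold pvR; omega

lemma pv_flat_filter_aux (items : List (Int × Int × Int)) (k : Int) (K : List Int)
    (hK : K.Nodup) :
    (K.flatMap (pvF items)).filter (fun t => t.2.1 == k) =
      if k ∈ K then items.filter (fun t => t.2.1 == k) else [] := by
  induction K with
  | nil => simp
  | cons e K' ih =>
    rw [List.flatMap_cons, List.filter_append, ih (List.nodup_cons.1 hK).2]
    by_cases hek : e = k
    · subst hek
      rw [if_neg (List.nodup_cons.1 hK).1, if_pos (List.mem_cons_self ..)]
      simp [pvF, List.filter_filter]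
    · have h1 : (pvF items e).filter (fun t => t.2.1 == k) = [] := by
        rw [List.filter_eq_nil_iff]
        intro x hx
        have hxe : x.2.1 = e := by simpa using (List.mem_filter.1 (by simpa [pvF] using hx : x ∈ items.filter (fun t => t.2.1 == e))).2
        simp [hxe, hek]
      rw [h1]
      simp [List.mem_cons, Ne.symm hek]

-- every item's end is < n, and an item with negative end has non-positive winnings
lemma pv_items_bounds (wi : List Int) (comps : List (Int × Int × Int))
    (hpre : pvGood wi comps) :
    ∀ t ∈ pvItems wi comps, t.2.1 < (wi.length : Int) ∧ (t.2.1 < 0 → t.2.2 ≤ 0) := by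
  intro t ht
  rcases List.mem_append.1 ht with hw | hc
  · rcases List.mem_map.1 hw with ⟨p, hp, rfl⟩
    rcases (PySem.List.mem_enumerate_iff _ _ _).1 hp with ⟨k, hk, rfl⟩
    simp; omega
  · obtain ⟨-, h2⟩ := hpre t hc
    rcases h2 with h2 | h2
    · exact ⟨by omega, by omega⟩
    · exact ⟨by omega, fun _ => h2.2.2⟩

lemma mem_merge_sortA (l : List (Int × Int × Int)) (x : Int × Int × Int) :
    x ∈ merge_sortA l ↔ x ∈ l := by
  induction l using merge_sortA.induct with
  | case1 l h => rw [merge_sortA, if_pos h]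
  | case2 l h ih1 ih2 =>
    rw [merge_sortA, if_neg h, mem_mergeA, ih1, ih2, ← List.mem_append,
      List.take_append_drop]

-- a list sorted by end splits into its negative-end prefix and nonnegative-end suffix
lemma pv_sorted_split (S : List (Int × Int × Int)) (h : S.Pairwise pvR) :
    S = S.filter (fun t => decide (t.2.1 < 0)) ++ S.filter (fun t => decide (0 ≤ t.2.1)) := by
  induction S with
  | nil => rfl
  | cons a S ih =>
    rw [List.pairwise_cons] at h
    by_cases ha : a.2.1 < 0
    · rw [List.filter_cons, List.filter_cons, if_pos (by simpa using ha),
        if_neg (by simp; omega), List.cons_append]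
      exact congrArg (a :: ·) (ih h.2)
    · have hall : ∀ x ∈ S, ¬ x.2.1 < 0 := by
        intro x hx
        have := h.1 x hx
        unfold pvR at this
        omega
      have hneg : S.filter (fun t => decide (t.2.1 < 0)) = [] :=
        List.filter_eq_nil_iff.2 (by intro x hx; simpa using hall x hx)
      have hpos : S.filter (fun t => decide (0 ≤ t.2.1)) = S :=
        List.filter_eq_self.2 (by intro x hx; have := hall x hx; simpa using by omega)
      rw [List.filter_cons, List.filter_cons, if_neg (by simpa using ha),
        if_pos (by simp; omega), hneg, hpos, List.nil_append]

-- the keys of the sorted option list under Pre_: exactly 0, 1, …, n-1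
lemma pv_pos_list (wi : List Int) (comps : List (Int × Int × Int))
    (hpre : pvGood wi comps) :
    (merge_sortA (pvItems wi comps)).filter (fun t => decide (0 ≤ t.2.1)) =
      (PySem.List.pyRange 0 (wi.length : Int) 1).flatMap (pvF (pvItems wi comps)) := by
  apply pv_uniq
  · exact (merge_sortA_pairwise _).sublist List.filter_sublist
  · exact pv_flat_pairwise _ _ (PySem.List.pairwise_lt_pyRange_one 0 _)
  · intro k
    rw [pv_flat_filter_aux _ _ _ (PySem.List.nodup_pyRange_one 0 _)]
    by_cases hk0 : 0 ≤ k
    · have hleft : ((merge_sortA (pvItems wi comps)).filter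
          (fun t => decide (0 ≤ t.2.1))).filter (fun t => t.2.1 == k) =
          (merge_sortA (pvItems wi comps)).filter (fun t => t.2.1 == k) := by
        rw [List.filter_filter]
        apply List.filter_congr
        intro t _
        by_cases ht : t.2.1 = k
        · simp [ht]; omega
        · simp [ht]
      rw [hleft, merge_sortA_filter]
      by_cases hk : k ∈ PySem.List.pyRange 0 (wi.length : Int) 1
      · rw [if_pos hk]
      · rw [if_neg hk, List.filter_eq_nil_iff]
        intro x hx hc
        apply hk
        rw [beq_iff_eq] at hc
        have := pv_items_bounds wi comps hpre x hx
        rw [PySem.List.mem_pyRange_one]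
        omega
    · have hk' : k ∉ PySem.List.pyRange 0 (wi.length : Int) 1 := by
        rw [PySem.List.mem_pyRange_one]
        omega
      rw [if_neg hk', List.filter_eq_nil_iff]
      intro x hx hc
      have hxpos : (0 : Int) ≤ x.2.1 := by simpa using (List.mem_filter.1 hx).2
      rw [beq_iff_eq] at hc
      omega

-- assembly: A's port as a fold of pvStep over the merge-sorted items
lemma pre_eq (wi : List Int) : weekly_income_preprocessA wi = pvW wi := by
  unfold weekly_income_preprocessA pvW
  rw [PySem.List.foldl_append_singleton_eq_map, PySem.List.enumerate_eq_map_pyRange (d := 0),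
    List.map_map]
  simp [Function.comp]

lemma mainA (wi : List Int) (comps : List (Int × Int × Int)) :
    best_schedule wi comps =
      PySem.List.pyGetD
        ((merge_sortA (pvItems wi comps)).foldl pvStep
          (PySem.List.pyRepeat [(0 : Int)] ((wi.length : Int) + 1))) (-1) 0 := by
  show PySem.List.pyGetD
      ((PySem.List.pyRange 0
          (PySem.List.len (merge_sortA (weekly_income_preprocessA wi ++ comps))) 1).foldl
        (fun memo index =>
          pvStep memo
            (PySem.List.pyGetD (merge_sortA (weekly_income_preprocessA wi ++ comps)) index
              ((0 : Int), (0 : Int), (0 : Int))))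
        (PySem.List.pyRepeat [(0 : Int)] (((weekly_income_preprocessA wi).length : Int) + 1)))
      (-1) 0 = _
  rw [PySem.List.foldl_pyRange_zero_pyGetD, pre_eq]
  have hlen : ((pvW wi).length : Int) = (wi.length : Int) := by
    simp [pvW, PySem.List.length_enumerate]
  rw [hlen]
  rfl

-- lengths are preserved by the updates
-- weekly buckets: keys strictly above m contribute nothing …
lemma pvW_filter_lt (l : List Int) (s m : Int) (h : m < s) :
    ((PySem.List.enumerate l s).map (fun p => (p.1, p.1, p.2))).filter
      (fun t => t.2.1 == m) = [] := by
  induction l generalizing s with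
  | nil => simp [PySem.List.enumerate_nil]
  | cons x t ih =>
    rw [PySem.List.enumerate_cons, List.map_cons, List.filter_cons]
    rw [if_neg (by simp; omega)]
    exact ih (s + 1) (by omega)

-- … so the weekly bucket at an in-range key is a singleton
lemma pvW_filter_en (l : List Int) (s m : Int) (h1 : s ≤ m) (h2 : m < s + l.length) :
    ((PySem.List.enumerate l s).map (fun p => (p.1, p.1, p.2))).filter
      (fun t => t.2.1 == m) = [(m, m, l.getD (m - s).toNat 0)] := by
  induction l generalizing s with
  | nil => simp at h2; omega
  | cons x t ih =>
    rw [PySem.List.enumerate_cons, List.map_cons, List.filter_cons]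
    by_cases hsm : s = m
    · subst hsm
      rw [if_pos (by simp)]
      rw [pvW_filter_lt t (s + 1) s (by omega)]
      simp
    · rw [if_neg (by simp; omega)]
      rw [ih (s + 1) (by omega) (by simp at h2 ⊢; omega)]
      have hidx : (m - s).toNat = (m - (s + 1)).toNat + 1 := by omega
      rw [hidx]
      simp

lemma pvW_filter (wi : List Int) (m : Nat) (hm : m < wi.length) :
    (pvW wi).filter (fun t => t.2.1 == (m : Int)) =
      [((m : Int), (m : Int), PySem.List.pyGetD wi (m : Int) 0)] := by
  unfold pvW
  rw [pvW_filter_en wi 0 (m : Int) (by omega) (by omega)]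
  simp

lemma pyGetD_rep0 (m : Nat) (i : Int) :
    PySem.List.pyGetD (List.replicate m (0 : Int)) i 0 = 0 := by
  by_cases h : PySem.Raise.InRange (List.replicate m (0 : Int)).length i
  · exact List.eq_of_mem_replicate (PySem.List.pyGetD_mem _ _ h)
  · exact PySem.List.pyGetD_of_none _ _ _ ((PySem.List.pyGet?_eq_none_iff _ _).2 h)

lemma pySetIdx_rep0 (m : Nat) (i : Int) :
    pySetIdx (List.replicate m (0 : Int)) i 0 = List.replicate m 0 := by
  unfold pySetIdx
  split_ifs <;> simp [List.set_replicate_self]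

-- the negative-end tasks (all with non-positive winnings) leave the all-zero memo unchanged
lemma pv_zero_fold (L : List (Int × Int × Int)) (h : ∀ t ∈ L, t.2.2 ≤ 0) (m : Nat) :
    L.foldl pvStep (List.replicate m (0 : Int)) = List.replicate m 0 := by
  induction L with
  | nil => rfl
  | cons t L ih =>
    have hstep : pvStep (List.replicate m (0 : Int)) t = List.replicate m 0 := by
      unfold pvStep
      rw [pyGetD_rep0, pyGetD_rep0, zero_add,
        max_eq_left (h t (List.mem_cons_self ..)), pySetIdx_rep0]
    rw [List.foldl_cons, hstep, ih (fun t' ht' => h t' (List.mem_cons_of_mem _ ht'))]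

lemma pySetIdx_length (xs : List Int) (i v : Int) : (pySetIdx xs i v).length = xs.length := by
  unfold pySetIdx
  split_ifs <;> try simp
  all_goals split_ifs <;> simp

lemma foldl_length_preserved {β : Type} (f : List Int → β → List Int)
    (h : ∀ m b, (f m b).length = m.length) (l : List β) (init : List Int) :
    (l.foldl f init).length = init.length := by
  induction l generalizing init with
  | nil => rfl
  | cons b l ih => rw [List.foldl_cons, ih, h]

-- ===== VERDICT (by name: the statement is the Claim_ definition above) =====
theorem best_schedule_spec : Claim_unchanged_best_schedule := by
  intro wi comps _ hpre
  unfold Spec_best_schedule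
  intro hnd
  have hpre : pvGood wi comps := by
    intro c hc
    obtain ⟨h1, h2, h3⟩ := hpre c hc
    refine ⟨h1, ?_⟩
    by_cases he : 0 ≤ c.2.1
    · exact Or.inl ⟨he, by omega⟩
    · refine Or.inr ⟨by omega, by omega, ?_⟩
      by_cases he2 : -2 ≤ c.2.1
      · by_contra hp
        exact hnd ⟨c, hc, by omega, by omega, by omega⟩
      · exact h3 (by omega)
  rw [mainA]
  have hrep0 : PySem.List.pyRepeat [(0 : Int)] ((wi.length : Int) + 1) =
      List.replicate (wi.length + 1) 0 := by
    have hc : ((wi.length : Int) + 1) = ((wi.length + 1 : Nat) : Int) := by push_cast; ring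
    rw [PySem.List.pyRepeat_singleton, hc, Int.toNat_natCast]
  -- the negative-end prefix of the sorted list is a no-op on the all-zero memo
  have hsplitfold : (merge_sortA (pvItems wi comps)).foldl pvStep
        (List.replicate (wi.length + 1) 0) =
      ((PySem.List.pyRange 0 (wi.length : Int) 1).flatMap
        (pvF (pvItems wi comps))).foldl pvStep (List.replicate (wi.length + 1) 0) := by
    conv_lhs => rw [pv_sorted_split (merge_sortA (pvItems wi comps)) (merge_sortA_pairwise _)]
    have hnegp : ∀ t ∈ (merge_sortA (pvItems wi comps)).filter
        (fun t => decide (t.2.1 < 0)), t.2.2 ≤ 0 := by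
      intro t ht
      have hm := List.mem_filter.1 ht
      have hti : t ∈ pvItems wi comps := (mem_merge_sortA _ _).1 hm.1
      exact (pv_items_bounds wi comps hpre t hti).2 (by simpa using hm.2)
    rw [List.foldl_append, pv_zero_fold _ hnegp, pv_pos_list wi comps hpre]
  -- the two folds produce the same final array
  -- the two folds produce the same final array
  have hfold : ((PySem.List.pyRange 0 (wi.length : Int) 1).flatMap
        (pvF (pvItems wi comps))).foldl pvStep (List.replicate (wi.length + 1) 0) =
      (PySem.List.pyRange 0 (PySem.List.len wi) 1).foldl
        (fun best j =>
          comps.foldl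
            (fun best t =>
              if t.2.1 == j then
                pySetIdx best (j + 1)
                  (max (PySem.List.pyGetD best (j + 1) 0)
                    (PySem.List.pyGetD best t.1 0 + t.2.2))
              else best)
            (pySetIdx best (j + 1)
              (max (PySem.List.pyGetD best (j + 1) 0)
                (PySem.List.pyGetD best j 0 + PySem.List.pyGetD wi j 0))))
        (List.replicate (wi.length + 1) 0) := by
    rw [List.foldl_flatMap, PySem.List.len_eq]
    apply PySem.List.foldl_congr_mem
    intro best j hj
    have hjr := (PySem.List.mem_pyRange_one).1 hj
    have hbucket : pvF (pvItems wi comps) j =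
        (j, j, PySem.List.pyGetD wi j 0) :: comps.filter (fun t => t.2.1 == j) := by
      unfold pvF pvItems
      rw [List.filter_append]
      have hjn : j = ((j.toNat : Nat) : Int) := by omega
      rw [hjn, pvW_filter wi j.toNat (by omega)]
      rfl
    rw [hbucket, List.foldl_cons, PySem.List.foldl_if_eq_foldl_filter]
    have hhead : pvStep best (j, j, PySem.List.pyGetD wi j 0) =
        pySetIdx best (j + 1)
          (max (PySem.List.pyGetD best (j + 1) 0)
            (PySem.List.pyGetD best j 0 + PySem.List.pyGetD wi j 0)) := rfl
    rw [hhead]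
    apply PySem.List.foldl_congr_mem
    intro acc t ht
    have hte : t.2.1 = j := by
      simpa using (List.mem_filter.1 ht).2
    unfold pvStep
    rw [hte]
  -- the final reads best[-1] (A) and best[n] (B) agree on the length-(n+1) array
  have hlenpre : ∀ (l : List (Int × Int × Int)) (init : List Int),
      (l.foldl pvStep init).length = init.length := by
    intro l init
    apply foldl_length_preserved
    intro m b
    unfold pvStep
    exact pySetIdx_length _ _ _
  show PySem.List.pyGetD _ (-1) 0 = best_schedule_alt wi comps
  have halt : best_schedule_alt wi comps =
      PySem.List.pyGetD
        ((PySem.List.pyRange 0 (PySem.List.len wi) 1).foldl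
          (fun best j =>
            comps.foldl
              (fun best t =>
                if t.2.1 == j then
                  pySetIdx best (j + 1)
                    (max (PySem.List.pyGetD best (j + 1) 0)
                      (PySem.List.pyGetD best t.1 0 + t.2.2))
                else best)
              (pySetIdx best (j + 1)
                (max (PySem.List.pyGetD best (j + 1) 0)
                  (PySem.List.pyGetD best j 0 + PySem.List.pyGetD wi j 0))))
          (PySem.List.pyRepeat [(0 : Int)] ((wi.length : Int) + 1)))
        (PySem.List.len wi) 0 := rfl
  rw [halt, hrep0, hsplitfold, hfold]
  set F := (PySem.List.pyRange 0 (PySem.List.len wi) 1).foldl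
      (fun best j =>
        comps.foldl
          (fun best t =>
            if t.2.1 == j then
              pySetIdx best (j + 1)
                (max (PySem.List.pyGetD best (j + 1) 0)
                  (PySem.List.pyGetD best t.1 0 + t.2.2))
            else best)
          (pySetIdx best (j + 1)
            (max (PySem.List.pyGetD best (j + 1) 0)
              (PySem.List.pyGetD best j 0 + PySem.List.pyGetD wi j 0))))
      (List.replicate (wi.length + 1) 0) with hF
  have hFlen : F.length = wi.length + 1 := by
    rw [← hfold, hlenpre]
    simp
  have hne : F ≠ [] := by
    intro h
    rw [h] at hFlen
    simp at hFlen
  rw [PySem.List.pyGetD_neg_one _ _ hne, PySem.List.len_eq,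
    PySem.List.pyGetD_eq_getElem _ _ (by omega) (by rw [hFlen]; push_cast; omega)]
  rw [List.getLast_eq_getElem]
  congr 1
  omega

theorem best_schedule_changed : Claim_changed_best_schedule := by
  unfold Claim_changed_best_schedule
  have h2 : merge_sortA (pvItems [5] [((0 : Int), (-1 : Int), (3 : Int))]) =
      [((0 : Int), (-1 : Int), (3 : Int)), ((0 : Int), (0 : Int), (5 : Int))] := by
    have h0 : pvItems [5] [((0 : Int), (-1 : Int), (3 : Int))] =
        [((0 : Int), (0 : Int), (5 : Int)), ((0 : Int), (-1 : Int), (3 : Int))] := by decide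
    rw [h0, merge_sortA]
    norm_num
    rw [merge_sortA, merge_sortA]
    norm_num [mergeA]
    rw [merge_sortA]
    norm_num [mergeA]
  have hA : best_schedule [5] [((0 : Int), (-1 : Int), (3 : Int))] = 8 := by
    rw [mainA, h2]
    decide
  exact ⟨by decide, by decide, by decide, hA, by decide, by decide⟩
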